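-- pv_equiv track=rewrite | github.com/Vinayaks439/ASTRA | agents/insights/agent.py | _build_template_insights
-- ===== SOURCE A (Python) =====
-- def _build_template_insights(skus: list, risks: list, tickets: list) -> list[str]:
--     """Deterministic template when LLM is unavailable."""
--     risk_map = {}
--     for r in risks:
--         sid = r.get("skuId")
--         if sid and sid not in risk_map:
--             risk_map[sid] = r
--
--     critical = sum(1 for r in risk_map.values() if r.get("band") == "CRITICAL")
--     warning = sum(1 for r in risk_map.values() if r.get("band") == "WARNING")
--     healthy = len(skus) - critical - warning
--     open_tickets = sum(1 for t in tickets if t.get("status") == "OPEN")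
--     auto = sum(1 for r in risk_map.values() if r.get("agentMode") == "auto")
--
--     insights = []
--     if critical > 0:
--         insights.append(f"{critical} of {len(skus)} SKUs are in CRITICAL risk band — immediate pricing review recommended.")
--     if open_tickets > 0:
--         insights.append(f"{open_tickets} exception tickets require human approval before agent actions can proceed.")
--     if auto > 0:
--         insights.append(f"{auto} SKUs are operating autonomously within configured guardrails.")
--
--     while len(insights) < 3:
--         insights.append(f"Monitoring {len(skus)} SKUs across all risk bands. System operating normally.")
--
--     return insights[:3]
-- ===== SOURCE B (Python) =====
-- def _build_template_insights(skus: list, risks: list, tickets: list) -> list[str]: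
--     """Deterministic template when LLM is unavailable."""
--     # No dict/set at all: a risk counts iff its truthy skuId occurs for the
--     # first time, decided by a direct look-back scan over the earlier risks.
--     def first_hit(i, r):
--         sid = r.get("skuId")
--         return bool(sid) and all(p.get("skuId") != sid for p in risks[:i])
--
--     critical = sum(1 for i, r in enumerate(risks)
--                    if r.get("band") == "CRITICAL" and first_hit(i, r))
--     auto = sum(1 for i, r in enumerate(risks)
--                if r.get("agentMode") == "auto" and first_hit(i, r))
--     open_tickets = sum(1 for t in tickets if t.get("status") == "OPEN")
--     n = len(skus)
--
--     pairs = [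
--         (critical, f"{critical} of {n} SKUs are in CRITICAL risk band — immediate pricing review recommended."),
--         (open_tickets, f"{open_tickets} exception tickets require human approval before agent actions can proceed."),
--         (auto, f"{auto} SKUs are operating autonomously within configured guardrails."),
--     ]
--     insights = [m for c, m in pairs if c > 0]
--     pad = f"Monitoring {n} SKUs across all risk bands. System operating normally."
--     return (insights + [pad] * 3)[:3]
-- ===== Notes on version B (the rewrite author's own statement) =====
-- stated objective: alternative
-- what changed: Dropped the risk_map dict entirely: first-occurrence dedup is decided by a direct look-back scan over the earlier risks (nested scan instead of a hash table), the two risk counts are single comprehensions over enumerate(risks), and the conditional appends plus while-padding are replaced by filtering a (count, message) pair table and arithmetic padding (insights + [pad]*3)[:3].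
import Mathlib
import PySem

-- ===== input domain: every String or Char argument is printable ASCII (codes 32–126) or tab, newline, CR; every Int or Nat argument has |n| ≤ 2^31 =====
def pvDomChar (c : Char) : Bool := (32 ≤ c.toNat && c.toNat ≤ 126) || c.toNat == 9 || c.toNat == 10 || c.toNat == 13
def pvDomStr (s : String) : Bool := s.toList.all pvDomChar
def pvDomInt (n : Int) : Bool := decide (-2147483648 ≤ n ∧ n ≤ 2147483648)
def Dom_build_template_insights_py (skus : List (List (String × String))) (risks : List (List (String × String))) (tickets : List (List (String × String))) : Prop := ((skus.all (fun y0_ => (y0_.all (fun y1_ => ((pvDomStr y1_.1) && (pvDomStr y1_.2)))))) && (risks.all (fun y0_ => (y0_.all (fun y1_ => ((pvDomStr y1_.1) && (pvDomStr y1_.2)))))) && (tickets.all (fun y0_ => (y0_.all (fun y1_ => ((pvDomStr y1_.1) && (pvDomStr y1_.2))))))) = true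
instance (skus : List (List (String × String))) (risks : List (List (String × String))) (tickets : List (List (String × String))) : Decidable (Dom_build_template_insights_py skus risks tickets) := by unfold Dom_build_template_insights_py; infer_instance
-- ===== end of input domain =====

-- B removes A's risk_map dict: first-occurrence dedup is a direct look-back scan over earlier
-- risks, counts are comprehensions over enumerate(risks), and the conditional appends plus
-- while-padding become a filtered (count, message) table plus (insights + [pad]*3)[:3];
-- objective: alternative (quadratic look-back instead of a hash table).

-- r.get(key) on a row given as an association list (first match, Python dict lookup)
def pvGet (r : List (String × String)) (k : String) : Option String :=
  (PySem.Dict.mk r).get? k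

-- ===== PORT A =====
-- the first loop: risk_map[sid] = r for truthy, unseen sid
def pvRiskMap (risks : List (List (String × String))) : PySem.Dict String (List (String × String)) :=
  risks.foldl (fun m r =>
    match pvGet r "skuId" with
    | some sid => if sid ≠ "" ∧ ¬ (m.contains sid = true) then m.insert sid r else m
    | none => m) PySem.Dict.empty

-- while len(insights) < 3: insights.append(pad)
def pvWhilePad (ins : List String) (pad : String) : List String :=
  if ins.length < 3 then pvWhilePad (ins ++ [pad]) pad else ins
termination_by 3 - ins.length
decreasing_by simp_all; omega

def build_template_insights_py (skus : List (List (String × String))) (risks : List (List (String × String))) (tickets : List (List (String × String))) : List String :=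
  let risk_map := pvRiskMap risks
  let critical : Int := risk_map.values.foldl (fun acc r => if pvGet r "band" = some "CRITICAL" then acc + 1 else acc) 0
  let warning : Int := risk_map.values.foldl (fun acc r => if pvGet r "band" = some "WARNING" then acc + 1 else acc) 0
  let _healthy : Int := (skus.length : Int) - critical - warning
  let open_tickets : Int := tickets.foldl (fun acc t => if pvGet t "status" = some "OPEN" then acc + 1 else acc) 0
  let auto : Int := risk_map.values.foldl (fun acc r => if pvGet r "agentMode" = some "auto" then acc + 1 else acc) 0
  let ins0 : List String := []
  let ins1 := if critical > 0 then ins0 ++ [PySem.Int.toStr critical ++ " of " ++ PySem.Int.toStr (skus.length : Int) ++ " SKUs are in CRITICAL risk band — immediate pricing review recommended."] else ins0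
  let ins2 := if open_tickets > 0 then ins1 ++ [PySem.Int.toStr open_tickets ++ " exception tickets require human approval before agent actions can proceed."] else ins1
  let ins3 := if auto > 0 then ins2 ++ [PySem.Int.toStr auto ++ " SKUs are operating autonomously within configured guardrails."] else ins2
  PySem.List.slice (pvWhilePad ins3 (("Monitoring " ++ PySem.Int.toStr (skus.length : Int)) ++ " SKUs across all risk bands. System operating normally.")) none (some 3)

-- ===== PORT B =====
-- first_hit(i, r): sid truthy and no earlier risk (risks[:i]) carries the same skuId
def pvFirstHit (risks : List (List (String × String))) (i : Int) (r : List (String × String)) : Bool :=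
  match pvGet r "skuId" with
  | some sid => decide (sid ≠ "") && (PySem.List.slice risks none (some i)).all (fun p => decide (pvGet p "skuId" ≠ some sid))
  | none => false

def build_template_insights_py_alt (skus : List (List (String × String))) (risks : List (List (String × String))) (tickets : List (List (String × String))) : List String :=
  let critical : Int := (PySem.List.enumerate risks).foldl (fun acc ir => if pvGet ir.2 "band" = some "CRITICAL" ∧ pvFirstHit risks ir.1 ir.2 = true then acc + 1 else acc) 0
  let auto : Int := (PySem.List.enumerate risks).foldl (fun acc ir => if pvGet ir.2 "agentMode" = some "auto" ∧ pvFirstHit risks ir.1 ir.2 = true then acc + 1 else acc) 0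
  let open_tickets : Int := tickets.foldl (fun acc t => if pvGet t "status" = some "OPEN" then acc + 1 else acc) 0
  let n : Int := (skus.length : Int)
  let pairs : List (Int × String) :=
    [(critical, PySem.Int.toStr critical ++ " of " ++ PySem.Int.toStr n ++ " SKUs are in CRITICAL risk band — immediate pricing review recommended."),
     (open_tickets, PySem.Int.toStr open_tickets ++ " exception tickets require human approval before agent actions can proceed."),
     (auto, PySem.Int.toStr auto ++ " SKUs are operating autonomously within configured guardrails.")]
  let insights := (pairs.filter (fun cm => decide (cm.1 > 0))).map Prod.snd
  let pad := ("Monitoring " ++ PySem.Int.toStr n) ++ " SKUs across all risk bands. System operating normally."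
  (insights ++ List.replicate 3 pad).take 3

-- ===== PRECONDITION & SPEC =====
def Spec_build_template_insights_py (skus : List (List (String × String))) (risks : List (List (String × String))) (tickets : List (List (String × String))) (out : List String) : Prop := out = build_template_insights_py_alt skus risks tickets
instance (skus : List (List (String × String))) (risks : List (List (String × String))) (tickets : List (List (String × String))) (out : List String) : Decidable (Spec_build_template_insights_py skus risks tickets out) := by unfold Spec_build_template_insights_py; infer_instance

-- ===== CLAIM (what is proved, stated in full; the proofs are below) =====
def Claim_equal_build_template_insights_py : Prop := ∀ (skus : List (List (String × String))) (risks : List (List (String × String))) (tickets : List (List (String × String))), Dom_build_template_insights_py skus risks tickets → Spec_build_template_insights_py skus risks tickets (build_template_insights_py skus risks tickets)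

-- ===== LEMMAS AND PROOFS =====

-- A's dict fold, as a named step function for the lemmas below
def pvStep (m : PySem.Dict String (List (String × String))) (r : List (String × String)) : PySem.Dict String (List (String × String)) :=
  match pvGet r "skuId" with
  | some sid => if sid ≠ "" ∧ ¬ (m.contains sid = true) then m.insert sid r else m
  | none => m

-- invariant: folding the remaining risks onto m appends exactly the first-hit rows,
-- provided m's keys record precisely the truthy sids seen in the first k risks
theorem pvRiskMap_values_inv (full : List (List (String × String))) :
    ∀ (rest : List (List (String × String))) (k : Nat) (m : PySem.Dict String (List (String × String))),
    full.drop k = rest →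
    (∀ sid : String, sid ≠ "" →
        (m.contains sid = true ↔ ¬ ((full.take k).all (fun p => decide (pvGet p "skuId" ≠ some sid)) = true))) →
    (List.foldl pvStep m rest).values
      = m.values ++ ((PySem.List.enumerate rest (k : Int)).filter (fun ir => pvFirstHit full ir.1 ir.2)).map Prod.snd := by
  intro rest
  induction rest with
  | nil => intro k m _ _; simp [PySem.List.enumerate_nil]
  | cons r rs ih =>
    intro k m hdrop hinv
    have hget : full[k]? = some r := by
      have : (full.drop k)[0]? = some r := by rw [hdrop]; rfl
      simpa using this
    have hklt : k < full.length := by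
      by_contra h
      rw [List.getElem?_eq_none (by omega)] at hget
      simp at hget
    have htake : full.take (k + 1) = full.take k ++ [r] := by
      rw [List.take_succ, hget]; rfl
    have hdrop' : full.drop (k + 1) = rs := by
      have : full.drop (k + 1) = (full.drop k).drop 1 := by
        rw [List.drop_drop]
      rw [this, hdrop]; rfl
    have hslice : PySem.List.slice full none (some (k : Int)) = full.take k :=
      PySem.List.slice_to_natCast full k
    rw [List.foldl_cons, PySem.List.enumerate_cons]
    have hcast : ((k : Int) + 1) = ((k + 1 : Nat) : Int) := by push_cast; ring
    rw [hcast]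
    show (List.foldl pvStep (pvStep m r) rs).values = _
    cases hg : pvGet r "skuId" with
    | none =>
      have hstep : pvStep m r = m := by simp [pvStep, hg]
      have hfh : pvFirstHit full (k : Int) r = false := by simp [pvFirstHit, hg]
      have hinv' : ∀ sid : String, sid ≠ "" →
          (m.contains sid = true ↔ ¬ ((full.take (k+1)).all (fun p => decide (pvGet p "skuId" ≠ some sid)) = true)) := by
        intro sid hsid
        rw [htake, List.all_append]
        have : ([r].all (fun p => decide (pvGet p "skuId" ≠ some sid))) = true := by
          simp [hg]
        rw [this, Bool.and_true]
        exact hinv sid hsid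
      rw [hstep, ih (k+1) m hdrop' hinv']
      simp [hfh]
    | some sid =>
      by_cases hsid : sid = ""
      · -- falsy sid: neither inserted nor counted
        subst hsid
        have hstep : pvStep m r = m := by simp [pvStep, hg]
        have hfh : pvFirstHit full (k : Int) r = false := by simp [pvFirstHit, hg]
        have hinv' : ∀ s : String, s ≠ "" →
            (m.contains s = true ↔ ¬ ((full.take (k+1)).all (fun p => decide (pvGet p "skuId" ≠ some s)) = true)) := by
          intro s hs
          rw [htake, List.all_append]
          have : ([r].all (fun p => decide (pvGet p "skuId" ≠ some s))) = true := by
            simp [hg]; intro h; first | exact hs h | exact hs h.symm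
          rw [this, Bool.and_true]
          exact hinv s hs
        rw [hstep, ih (k+1) m hdrop' hinv']
        simp [hfh]
      · by_cases hc : m.contains sid = true
        · -- already seen: skip, and first_hit is false via the look-back
          have hstep : pvStep m r = m := by
            simp [pvStep, hg, hc]
          have hall : ((full.take k).all (fun p => decide (pvGet p "skuId" ≠ some sid))) = false := by
            have := (hinv sid hsid).mp hc
            cases h : (full.take k).all (fun p => decide (pvGet p "skuId" ≠ some sid))
            · rfl
            · exact absurd h this
          have hfh : pvFirstHit full (k : Int) r = false := by
            simp only [pvFirstHit, hg, hslice]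
            rw [hall, Bool.and_false]
          have hinv' : ∀ s : String, s ≠ "" →
              (m.contains s = true ↔ ¬ ((full.take (k+1)).all (fun p => decide (pvGet p "skuId" ≠ some s)) = true)) := by
            intro s hs
            by_cases hss : s = sid
            · subst hss
              have hfalse : ((full.take (k+1)).all (fun p => decide (pvGet p "skuId" ≠ some s))) = false := by
                rw [htake, List.all_append, hall, Bool.false_and]
              rw [hfalse]
              simp [hc]
            · rw [htake, List.all_append]
              have hr1 : ([r].all (fun p => decide (pvGet p "skuId" ≠ some s))) = true := by
                simp [hg]; intro h; first | exact hss h | exact hss h.symm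
              rw [hr1, Bool.and_true]
              exact hinv s hs
          rw [hstep, ih (k+1) m hdrop' hinv']
          simp [hfh]
        · -- new truthy sid: inserted by A, counted by B
          have hcf : m.contains sid = false := by
            cases h : m.contains sid
            · rfl
            · exact absurd h hc
          have hstep : pvStep m r = m.insert sid r := by
            simp [pvStep, hg, hsid, hcf]
          have hall : ((full.take k).all (fun p => decide (pvGet p "skuId" ≠ some sid))) = true := by
            by_contra h
            exact hc ((hinv sid hsid).mpr h)
          have hfh : pvFirstHit full (k : Int) r = true := by
            simp only [pvFirstHit, hg, hslice]
            rw [hall]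
            simp [hsid]
          have hvals : (m.insert sid r).values = m.values ++ [r] := by
            simp [PySem.Dict.values, PySem.Dict.items_insert_of_not_contains m r hcf]
          have hinv' : ∀ s : String, s ≠ "" →
              ((m.insert sid r).contains s = true ↔ ¬ ((full.take (k+1)).all (fun p => decide (pvGet p "skuId" ≠ some s)) = true)) := by
            intro s hs
            by_cases hss : s = sid
            · subst hss
              have hfalse : ((full.take (k+1)).all (fun p => decide (pvGet p "skuId" ≠ some s))) = false := by
                rw [htake, List.all_append]
                have : ([r].all (fun p => decide (pvGet p "skuId" ≠ some s))) = false := by simp [hg]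
                rw [this, Bool.and_false]
              have hcont : (m.insert s r).contains s = true := by
                rw [PySem.Dict.contains_eq_decide_mem_keys]
                simp [PySem.Dict.mem_keys_insert]
              rw [hfalse]
              simp [hcont]
            · rw [htake, List.all_append]
              rw [PySem.Dict.contains_eq_decide_mem_keys, decide_eq_true_iff, PySem.Dict.mem_keys_insert]
              have hr1 : ([r].all (fun p => decide (pvGet p "skuId" ≠ some s))) = true := by
                simp [hg]; intro h; first | exact hss h | exact hss h.symm
              rw [hr1, Bool.and_true]
              constructor
              · intro h
                rcases h with h | h
                · exact absurd h hss
                · exact (hinv s hs).mp (by rw [PySem.Dict.contains_eq_decide_mem_keys]; simpa using h)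
              · intro h
                right
                have := (hinv s hs).mpr h
                rw [PySem.Dict.contains_eq_decide_mem_keys] at this
                simpa using this
          rw [hstep, ih (k+1) (m.insert sid r) hdrop' hinv']
          simp [hfh, hvals]

-- A's dict values are exactly B's first-hit rows, in order
theorem pvRiskMap_values (risks : List (List (String × String))) :
    (pvRiskMap risks).values
      = ((PySem.List.enumerate risks).filter (fun ir => pvFirstHit risks ir.1 ir.2)).map Prod.snd := by
  have h := pvRiskMap_values_inv risks risks 0 PySem.Dict.empty (by simp) (by
    intro sid _
    constructor
    · intro h; rw [PySem.Dict.contains_eq_decide_mem_keys] at h; simp [PySem.Dict.keys_empty] at h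
    · intro h; simp at h)
  have hemp : (PySem.Dict.empty : PySem.Dict String (List (String × String))).values = [] := by
    simp [PySem.Dict.values, PySem.Dict.empty]
  rw [pvRiskMap]
  show (List.foldl pvStep PySem.Dict.empty risks).values = _
  rw [h, hemp]
  rfl

-- counting a predicate over A's dict values equals B's single counting pass over enumerate(risks)
theorem pvCount_eq (risks : List (List (String × String))) (P : List (String × String) → Prop)
    [DecidablePred P] :
    (PySem.List.enumerate risks).foldl (fun acc ir => if P ir.2 ∧ pvFirstHit risks ir.1 ir.2 = true then acc + 1 else acc) (0 : Int)
      = (pvRiskMap risks).values.foldl (fun acc r => if P r then acc + 1 else acc) (0 : Int) := by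
  rw [PySem.List.foldl_ite_add_one, PySem.List.foldl_ite_add_one, pvRiskMap_values]
  rw [List.countP_map, List.countP_filter]
  congr 2
  apply List.countP_congr
  intro ir _
  by_cases h1 : P ir.2 <;> by_cases h2 : pvFirstHit risks ir.1 ir.2 = true <;>
    simp [h1, h2, Function.comp]

theorem pvWhilePad_eq_aux (k : Nat) : ∀ (ins : List String) (pad : String),
    3 - ins.length = k → pvWhilePad ins pad = ins ++ List.replicate k pad := by
  induction k with
  | zero =>
    intro ins pad h
    rw [pvWhilePad]
    rw [if_neg (by omega)]
    simp
  | succ k ih =>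
    intro ins pad h
    rw [pvWhilePad]
    rw [if_pos (by omega)]
    rw [ih (ins ++ [pad]) pad (by simp; omega)]
    simp [List.replicate_succ]

-- A's while-padding then [:3] equals B's (ins ++ [pad]*3).take 3
theorem pvPad_take (ins : List String) (pad : String) :
    PySem.List.slice (pvWhilePad ins pad) none (some 3)
    = (ins ++ List.replicate 3 pad).take 3 := by
  rw [pvWhilePad_eq_aux (3 - ins.length) ins pad rfl]
  have h3 : PySem.List.slice (ins ++ List.replicate (3 - ins.length) pad) none (some (3 : Int))
      = (ins ++ List.replicate (3 - ins.length) pad).take 3 := by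
    simpa using PySem.List.slice_to_natCast (ins ++ List.replicate (3 - ins.length) pad) 3
  rw [h3, List.take_append, List.take_append, List.take_replicate, List.take_replicate]
  congr 2
  omega

-- B's filtered pair table equals A's chain of conditional appends
theorem pvPairs_filter (c1 c2 c3 : Int) (s1 s2 s3 : String) :
    (([(c1, s1), (c2, s2), (c3, s3)] : List (Int × String)).filter (fun cm => decide (cm.1 > 0))).map Prod.snd
    = (((if c1 > 0 then ([] : List String) ++ [s1] else []) ++ (if c2 > 0 then [s2] else [])) ++ (if c3 > 0 then [s3] else [])) := by
  by_cases h1 : c1 > 0 <;> by_cases h2 : c2 > 0 <;> by_cases h3 : c3 > 0 <;>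
    simp [List.filter, h1, h2, h3]

-- ===== VERDICT (by name: the statement is the Claim_ definition above) =====
theorem build_template_insights_py_spec : Claim_equal_build_template_insights_py := by
  intro skus risks tickets _
  show build_template_insights_py skus risks tickets = build_template_insights_py_alt skus risks tickets
  simp only [build_template_insights_py, build_template_insights_py_alt]
  rw [pvCount_eq risks (fun r => pvGet r "band" = some "CRITICAL"),
      pvCount_eq risks (fun r => pvGet r "agentMode" = some "auto"),
      pvPad_take, pvPairs_filter]
  split_ifs <;> rfl
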